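-- pv_equiv track=rewrite | github.com/BCM-Neurosurgery/av-brainvision-sync-pipeline | third_party/video_sync_nbu_main/scripts/parsers/wavfileparserefficient.py | _longest_plus_one_span
-- ===== SOURCE A (Python) =====
-- from typing import Deque, Dict, Iterator, List, Optional, Sequence, Tuple
--
-- def _longest_plus_one_span(vals: Sequence[int]) -> int:
--     if not vals:
--         return 0
--     best = cur = 1
--     for k in range(1, len(vals)):
--         if vals[k] - vals[k - 1] == 1:
--             cur += 1
--             if cur > best:
--                 best = cur
--         else:
--             cur = 1
--     return best
-- ===== SOURCE B (Python) =====
-- def _longest_plus_one_span(vals):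
--     if not vals:
--         return 0
--     diffs = [b - a for a, b in zip(vals, vals[1:])]
--     return _max_ones_run(diffs) + 1
--
--
-- def _leading_ones(d, i):
--     k = 0
--     while i + k < len(d) and d[i + k] == 1:
--         k += 1
--     return k
--
--
-- def _max_ones_run(d):
--     best = 0
--     i = 0
--     n = len(d)
--     while i < n:
--         k = _leading_ones(d, i)
--         if k == 0:
--             i += 1
--         else:
--             best = max(best, k)
--             i += k
--     return best
-- ===== Notes on version B (the rewrite author's own statement) =====
-- stated objective: alternative
-- what changed: B first materialises the adjacent-difference list, then consumes maximal runs of 1s wholesale (scan run length, slice past it, take max per run) instead of A's single index loop with a best/cur accumulator pair.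
import Mathlib
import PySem

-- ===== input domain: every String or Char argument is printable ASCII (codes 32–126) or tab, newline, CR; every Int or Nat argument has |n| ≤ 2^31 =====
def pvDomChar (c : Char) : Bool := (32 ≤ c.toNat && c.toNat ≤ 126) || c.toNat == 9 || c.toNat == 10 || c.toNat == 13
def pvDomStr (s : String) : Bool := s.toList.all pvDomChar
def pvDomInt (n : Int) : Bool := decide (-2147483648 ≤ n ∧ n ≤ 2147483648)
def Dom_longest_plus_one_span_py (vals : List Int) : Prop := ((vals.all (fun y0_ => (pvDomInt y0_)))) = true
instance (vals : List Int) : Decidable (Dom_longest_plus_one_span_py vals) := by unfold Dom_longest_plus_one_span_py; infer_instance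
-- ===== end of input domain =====

-- B computes the adjacent-difference list and consumes maximal runs of 1s wholesale (scan run, slice past it, max per run) instead of A's best/cur accumulator scan; alternative decomposition, same cost.

-- ===== PORT A =====
def longest_plus_one_span_py (vals : List Int) : Int :=
  if vals = [] then 0
  else
    let s := (PySem.List.pyRange 1 (PySem.List.len vals) 1).foldl
      (fun (bc : Int × Int) k =>
        if PySem.List.pyGetD vals k 0 - PySem.List.pyGetD vals (k - 1) 0 = 1 then
          let cur := bc.2 + 1
          (if cur > bc.1 then cur else bc.1, cur)
        else (bc.1, 1))
      (1, 1)
    s.1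

-- ===== PORT B =====
-- 'while k < len(d) and d[k] == 1: k += 1' ported as the obvious structural scan of the list
def pvLeadingOnes : List Int → Nat
  | [] => 0
  | x :: t => if x = 1 then pvLeadingOnes t + 1 else 0

-- B's while loop: consume either one non-1 element or a whole maximal run of 1s per iteration
def pvMaxOnesRun : List Int → Int → Int
  | [], best => best
  | x :: t, best =>
      let k := pvLeadingOnes (x :: t)
      if k = 0 then pvMaxOnesRun t best
      else pvMaxOnesRun ((x :: t).drop k) (max best (k : Int))
  termination_by d _ => d.length
  decreasing_by
    · simp
    · rename_i hk
      simp only [List.length_drop, List.length_cons]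
      set m := pvLeadingOnes (x :: t)
      omega

def longest_plus_one_span_py_alt (vals : List Int) : Int :=
  if vals = [] then 0
  else pvMaxOnesRun (List.zipWith (fun a b => b - a) vals vals.tail) 0 + 1

-- ===== PRECONDITION & SPEC =====
def Spec_longest_plus_one_span_py (vals : List Int) (out : Int) : Prop := out = longest_plus_one_span_py_alt vals
instance (vals : List Int) (out : Int) : Decidable (Spec_longest_plus_one_span_py vals out) := by unfold Spec_longest_plus_one_span_py; infer_instance

-- ===== CLAIM (what is proved, stated in full; the proofs are below) =====
def Claim_equal_longest_plus_one_span_py : Prop := ∀ (vals : List Int), Dom_longest_plus_one_span_py vals → Spec_longest_plus_one_span_py vals (longest_plus_one_span_py vals)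

-- ===== LEMMAS AND PROOFS =====

def pvM (d : List Int) : Int := pvMaxOnesRun d 0

lemma pvMaxOnesRun_cons (x : Int) (t : List Int) (b : Int) :
    pvMaxOnesRun (x :: t) b =
      if pvLeadingOnes (x :: t) = 0 then pvMaxOnesRun t b
      else pvMaxOnesRun ((x :: t).drop (pvLeadingOnes (x :: t))) (max b (pvLeadingOnes (x :: t) : Int)) := by
  rw [pvMaxOnesRun.eq_def]

lemma pvM_nonneg (d : List Int) (b : Int) : 0 ≤ b → b ≤ pvMaxOnesRun d b := by
  induction d, b using pvMaxOnesRun.induct with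
  | case1 b => intro hb; simp [pvMaxOnesRun]
  | case2 x t b k hk ih =>
      intro hb; rw [pvMaxOnesRun_cons, if_pos hk]; exact ih hb
  | case3 x t b k hk ih =>
      intro hb; rw [pvMaxOnesRun_cons, if_neg hk]
      exact le_trans (le_max_left b _) (ih (le_trans hb (le_max_left _ _)))

lemma pvM_nonneg0 (d : List Int) : 0 ≤ pvM d := pvM_nonneg d 0 le_rfl

lemma pvAcc (d : List Int) (b : Int) (hb : 0 ≤ b) : pvMaxOnesRun d b = max b (pvM d) := by
  have key : ∀ (n : Nat) (d : List Int), d.length ≤ n → ∀ b : Int, 0 ≤ b →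
      pvMaxOnesRun d b = max b (pvM d) := by
    intro n
    induction n with
    | zero =>
        intro d hd b hb
        have : d = [] := List.eq_nil_of_length_eq_zero (Nat.le_zero.mp hd)
        subst this; simp only [pvMaxOnesRun, pvM]; omega
    | succ n ih =>
        intro d hd b hb
        cases d with
        | nil => simp only [pvMaxOnesRun, pvM]; omega
        | cons x t =>
            by_cases hk : pvLeadingOnes (x :: t) = 0
            · have h2 : pvM (x :: t) = pvM t := by
                simp only [pvM]; rw [pvMaxOnesRun_cons, if_pos hk]
              rw [pvMaxOnesRun_cons, if_pos hk,
                ih t (by simpa using Nat.lt_succ_iff.mp (by simpa using hd)) b hb, h2]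
            · have hknn : (0:Int) ≤ (pvLeadingOnes (x :: t) : Int) := Int.natCast_nonneg _
              have hlen : ((x :: t).drop (pvLeadingOnes (x :: t))).length ≤ n := by
                simp only [List.length_drop, List.length_cons] at *
                omega
              have h2 : pvM (x :: t)
                  = max (max 0 (pvLeadingOnes (x :: t) : Int)) (pvM ((x :: t).drop (pvLeadingOnes (x :: t)))) := by
                simp only [pvM]
                rw [pvMaxOnesRun_cons, if_neg hk, ih _ hlen _ (le_max_left 0 _)]
                rfl
              rw [pvMaxOnesRun_cons, if_neg hk, ih _ hlen _ (le_trans hb (le_max_left b _)), h2]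
              have := pvM_nonneg0 ((x :: t).drop (pvLeadingOnes (x :: t)))
              simp only [max_def]; split_ifs <;> omega
  exact key d.length d le_rfl b hb

lemma pvLead_head (d : List Int) :
    d.drop (pvLeadingOnes d) = [] ∨ ∃ y t, d.drop (pvLeadingOnes d) = y :: t ∧ y ≠ 1 := by
  induction d with
  | nil => left; rfl
  | cons x t ih =>
      by_cases hx : x = 1
      · simp only [pvLeadingOnes, if_pos hx, List.drop_succ_cons]; exact ih
      · right; exact ⟨x, t, by simp [pvLeadingOnes, hx], hx⟩

lemma pvM_decomp (d : List Int) :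
    pvM d = max (pvLeadingOnes d : Int) (pvM (d.drop (pvLeadingOnes d + 1))) := by
  have hsplit : d.drop (pvLeadingOnes d + 1) = List.drop 1 (d.drop (pvLeadingOnes d)) := by
    rw [List.drop_drop, Nat.add_comm]
  have hdrop : pvM (d.drop (pvLeadingOnes d)) = pvM (d.drop (pvLeadingOnes d + 1)) := by
    rcases pvLead_head d with h | ⟨y, t, h, hy⟩
    · rw [hsplit, h]; rfl
    · have hk0 : pvLeadingOnes (y :: t) = 0 := by simp [pvLeadingOnes, hy]
      rw [hsplit, h]
      simp only [pvM, List.drop_one, List.tail_cons]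
      rw [pvMaxOnesRun_cons, if_pos hk0]
  cases d with
  | nil => simp [pvM, pvMaxOnesRun, pvLeadingOnes]
  | cons x t =>
      by_cases hk : pvLeadingOnes (x :: t) = 0
      · have h2 : pvM (x :: t) = pvM t := by
          simp only [pvM]; rw [pvMaxOnesRun_cons, if_pos hk]
        rw [h2, hk]
        simp only [hk, Nat.cast_zero] at hdrop ⊢
        rw [← hdrop]
        have := pvM_nonneg0 ((x :: t).drop 0)
        simp only [List.drop_zero] at *
        have h3 : pvM t = pvM (x :: t) := h2.symm
        omega
      · have h2 : pvM (x :: t) = max (max 0 (pvLeadingOnes (x :: t) : Int)) (pvM ((x :: t).drop (pvLeadingOnes (x :: t)))) := by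
          simp only [pvM]
          rw [pvMaxOnesRun_cons, if_neg hk, pvAcc _ _ (le_max_left 0 _)]
          rfl
        rw [h2, hdrop]
        have := pvM_nonneg0 ((x :: t).drop (pvLeadingOnes (x :: t) + 1))
        simp only [max_def]; split_ifs <;> omega

def pvF : Int × Int → Int → Int × Int := fun bc x =>
  if x = 1 then (if bc.2 + 1 > bc.1 then bc.2 + 1 else bc.1, bc.2 + 1) else (bc.1, 1)

lemma pvInv (d : List Int) : ∀ b c : Int, 1 ≤ c → c ≤ b →
    (d.foldl pvF (b, c)).1
      = max b (max (c + (pvLeadingOnes d : Int)) (pvM (d.drop (pvLeadingOnes d + 1)) + 1)) := by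
  induction d with
  | nil =>
      intro b c h1 h2
      simp only [List.foldl_nil, pvLeadingOnes, List.drop_nil, pvM, pvMaxOnesRun]
      simp only [max_def]; split_ifs <;> omega
  | cons x t ih =>
      intro b c h1 h2
      by_cases hx : x = 1
      · subst hx
        have hstep : pvF (b, c) 1 = (if c + 1 > b then c + 1 else b, c + 1) := by
          simp [pvF]
        rw [List.foldl_cons, hstep]
        have hb' : c + 1 ≤ (if c + 1 > b then c + 1 else b) := by split_ifs <;> omega
        rw [ih _ _ (by omega) hb']
        have hpre : pvLeadingOnes ((1:Int) :: t) = pvLeadingOnes t + 1 := by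
          simp [pvLeadingOnes]
        rw [hpre]
        have hdrop : ((1:Int) :: t).drop (pvLeadingOnes t + 1 + 1) = t.drop (pvLeadingOnes t + 1) := by
          simp
        rw [hdrop]
        have hm := pvM_nonneg0 (t.drop (pvLeadingOnes t + 1))
        push_cast
        simp only [max_def]; split_ifs <;> omega
      · have hstep : pvF (b, c) x = (b, 1) := by simp [pvF, hx]
        rw [List.foldl_cons, hstep]
        rw [ih _ _ le_rfl (by omega)]
        have hpre : pvLeadingOnes (x :: t) = 0 := by simp [pvLeadingOnes, hx]
        rw [hpre]
        have hdrop : (x :: t).drop (0 + 1) = t := by simp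
        rw [hdrop]
        have hdec := pvM_decomp t
        have hm := pvM_nonneg0 (t.drop (pvLeadingOnes t + 1))
        have hm2 := pvM_nonneg0 t
        push_cast
        simp only [max_def] at *; split_ifs at * <;> omega

lemma pvMapDiff (v : List Int) :
    (PySem.List.pyRange 1 (PySem.List.len v) 1).map
      (fun k => PySem.List.pyGetD v k 0 - PySem.List.pyGetD v (k - 1) 0)
      = List.zipWith (fun a b => b - a) v v.tail := by
  apply List.ext_getElem
  · simp [PySem.List.length_pyRange_one, List.length_tail]
  · intro i h1 h2
    have hi : i + 1 < v.length := by
      simp [PySem.List.length_pyRange_one] at h1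
      omega
    rw [List.getElem_map, PySem.List.getElem_pyRange_one, List.getElem_zipWith]
    have e1 : (1 : Int) + (i : Int) = ((i + 1 : Nat) : Int) := by push_cast; ring
    have e2 : ((i + 1 : Nat) : Int) - 1 = ((i : Nat) : Int) := by push_cast; ring
    rw [e1, e2, PySem.List.pyGetD_natCast, PySem.List.pyGetD_natCast,
      List.getD_eq_getElem v 0 hi, List.getD_eq_getElem v 0 (by omega),
      List.getElem_tail]

theorem pvFoldEq (vals : List Int) :
    (PySem.List.pyRange 1 (PySem.List.len vals) 1).foldl
      (fun (bc : Int × Int) k =>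
        if PySem.List.pyGetD vals k 0 - PySem.List.pyGetD vals (k - 1) 0 = 1 then
          let cur := bc.2 + 1
          (if cur > bc.1 then cur else bc.1, cur)
        else (bc.1, 1))
      (1, 1)
      = (List.zipWith (fun a b => b - a) vals vals.tail).foldl pvF (1, 1) := by
  rw [← pvMapDiff vals, List.foldl_map]
  rfl

-- ===== VERDICT (by name: the statement is the Claim_ definition above) =====
theorem longest_plus_one_span_py_spec : Claim_equal_longest_plus_one_span_py := by
  intro vals _
  unfold Spec_longest_plus_one_span_py longest_plus_one_span_py longest_plus_one_span_py_alt
  by_cases h : vals = []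
  · simp [h]
  · simp only [h, if_false]
    rw [pvFoldEq vals]
    set d := List.zipWith (fun a b => b - a) vals vals.tail with hd
    rw [pvInv d 1 1 le_rfl le_rfl]
    have hdec := pvM_decomp d
    have hm := pvM_nonneg0 (d.drop (pvLeadingOnes d + 1))
    have hp : (0:Int) ≤ (pvLeadingOnes d : Int) := Int.natCast_nonneg _
    have hB : pvMaxOnesRun d 0 = pvM d := rfl
    rw [hB]
    simp only [max_def] at *
    split_ifs at * <;> omega
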